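-- pv_equiv track=rewrite | github.com/dominikfronc/password_quality_evaluation-isolation_forest | metrics.py | convert_password
-- ===== SOURCE A (Python) =====
-- lowercase = set(range(97, 122))
--
-- uppercase = set(range(65, 90))
--
-- digits = set(range(48, 57))
--
-- symbols = set(range(32, 47)) | set(range(58, 64)) | set(range(91, 96)) | set(range(123, 126))
--
-- def convert_password(password):
--     vec = [0, 0, 0, 0, 0, 0]
--     vec[0] = len(password)-1
--     group = 0
--     for c in password:
--         if ord(c) in lowercase:
--             vec[1] += 1
--             if group != 1:
--                 vec[5] += 1
--                 group = 1
--         if ord(c) in uppercase: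
--             vec[2] += 1
--             if group != 2:
--                 vec[5] += 1
--                 group = 2
--         if ord(c) in digits:
--             vec[3] += 1
--             if group != 3:
--                 vec[5] += 1
--                 group = 3
--         if ord(c) in symbols:
--             vec[4] += 1
--             if group != 4:
--                 vec[5] += 1
--                 group = 4
--     return vec
-- ===== SOURCE B (Python) =====
-- lowercase = set(range(97, 122))
--
-- uppercase = set(range(65, 90))
--
-- digits = set(range(48, 57))
--
-- symbols = set(range(32, 47)) | set(range(58, 64)) | set(range(91, 96)) | set(range(123, 126))
--
-- def _label(c):
--     o = ord(c)
--     if o in lowercase: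
--         return 1
--     if o in uppercase:
--         return 2
--     if o in digits:
--         return 3
--     if o in symbols:
--         return 4
--     return 0
--
-- def convert_password(password):
--     labels = [_label(c) for c in password]
--     grouped = [l for l in labels if l != 0]
--     runs = 0
--     prev = 0
--     for l in grouped:
--         if l != prev:
--             runs += 1
--         prev = l
--     return [len(password) - 1,
--             labels.count(1), labels.count(2), labels.count(3), labels.count(4),
--             runs]
-- ===== Notes on version B (the rewrite author's own statement) =====
-- stated objective: alternative
-- what changed: A's single loop interleaving four membership tests with count and transition bookkeeping is split into a label pass (one group id per character) followed by separate list.count calls for the four counts and a run-counting pass over the non-zero labels.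
import Mathlib
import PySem

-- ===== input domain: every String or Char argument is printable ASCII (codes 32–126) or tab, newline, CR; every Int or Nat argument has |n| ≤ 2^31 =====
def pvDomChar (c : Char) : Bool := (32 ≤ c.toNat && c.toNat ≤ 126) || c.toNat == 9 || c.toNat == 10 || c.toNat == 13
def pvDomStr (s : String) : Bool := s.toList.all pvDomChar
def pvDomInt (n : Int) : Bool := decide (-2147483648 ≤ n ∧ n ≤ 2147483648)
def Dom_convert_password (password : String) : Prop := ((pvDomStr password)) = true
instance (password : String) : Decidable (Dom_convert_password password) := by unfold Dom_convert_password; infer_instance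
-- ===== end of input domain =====

-- B splits A's single interleaved loop into a label pass, four count calls and a run-counting pass (alternative decomposition, same cost).


-- ===== PORT A =====
def pyLowercase : PySem.Set Int := PySem.Set.ofList (PySem.List.pyRange 97 122 1)
def pyUppercase : PySem.Set Int := PySem.Set.ofList (PySem.List.pyRange 65 90 1)
def pyDigits : PySem.Set Int := PySem.Set.ofList (PySem.List.pyRange 48 57 1)
def pySymbols : PySem.Set Int :=
  PySem.Set.union
    (PySem.Set.union
      (PySem.Set.union (PySem.Set.ofList (PySem.List.pyRange 32 47 1))
        (PySem.Set.ofList (PySem.List.pyRange 58 64 1)))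
      (PySem.Set.ofList (PySem.List.pyRange 91 96 1)))
    (PySem.Set.ofList (PySem.List.pyRange 123 126 1))

-- A's loop body: four sequential membership tests, each updating its count, vec[5] and group.
def convStep (st : Int × Int × Int × Int × Int × Int) (c : Char) : Int × Int × Int × Int × Int × Int :=
  match st with
  | (v1, v2, v3, v4, v5, g) =>
    let o : Int := (c.toNat : Int)
    let (v1, v5, g) := if PySem.Set.contains pyLowercase o then
        (v1 + 1, (if g ≠ 1 then v5 + 1 else v5), (if g ≠ 1 then (1 : Int) else g))
      else (v1, v5, g)
    let (v2, v5, g) := if PySem.Set.contains pyUppercase o then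
        (v2 + 1, (if g ≠ 2 then v5 + 1 else v5), (if g ≠ 2 then (2 : Int) else g))
      else (v2, v5, g)
    let (v3, v5, g) := if PySem.Set.contains pyDigits o then
        (v3 + 1, (if g ≠ 3 then v5 + 1 else v5), (if g ≠ 3 then (3 : Int) else g))
      else (v3, v5, g)
    let (v4, v5, g) := if PySem.Set.contains pySymbols o then
        (v4 + 1, (if g ≠ 4 then v5 + 1 else v5), (if g ≠ 4 then (4 : Int) else g))
      else (v4, v5, g)
    (v1, v2, v3, v4, v5, g)

def convert_password (password : String) : List Int :=
  match password.toList.foldl convStep (0, 0, 0, 0, 0, 0) with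
  | (v1, v2, v3, v4, v5, _) =>
    [PySem.Str.len password - 1, v1, v2, v3, v4, v5]

-- ===== PORT B =====
def pvLabel (c : Char) : Int :=
  let o : Int := (c.toNat : Int)
  if PySem.Set.contains pyLowercase o then 1
  else if PySem.Set.contains pyUppercase o then 2
  else if PySem.Set.contains pyDigits o then 3
  else if PySem.Set.contains pySymbols o then 4
  else 0

def convert_password_alt (password : String) : List Int :=
  let labels := password.toList.map pvLabel
  let grouped := labels.filter (fun l => l != 0)
  let rp := grouped.foldl (fun (rp : Int × Int) l => ((if l != rp.2 then rp.1 + 1 else rp.1), l)) (0, 0)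
  [PySem.Str.len password - 1,
   PySem.List.count labels 1, PySem.List.count labels 2,
   PySem.List.count labels 3, PySem.List.count labels 4,
   rp.1]

-- ===== PRECONDITION & SPEC =====
def Spec_convert_password (password : String) (out : List Int) : Prop := out = convert_password_alt password
instance (password : String) (out : List Int) : Decidable (Spec_convert_password password out) := by unfold Spec_convert_password; infer_instance

-- ===== CLAIM (what is proved, stated in full; the proofs are below) =====
def Claim_equal_convert_password : Prop := ∀ (password : String), Dom_convert_password password → Spec_convert_password password (convert_password password)

-- ===== LEMMAS AND PROOFS =====

-- the group reached after consuming a label list, starting from group p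
def lastFrom (p : Int) : List Int → Int
  | [] => p
  | l :: ls => lastFrom l ls

-- number of group runs of a non-zero label list, seen from previous group p
def runsFrom (p : Int) : List Int → Int
  | [] => 0
  | l :: ls => (if l = p then 0 else 1) + runsFrom l ls

lemma mem_low (o : Int) : o ∈ pyLowercase ↔ (97 ≤ o ∧ o < 122) := by
  simp [pyLowercase, PySem.Set.mem_ofList, PySem.List.mem_pyRange_one]

lemma mem_up (o : Int) : o ∈ pyUppercase ↔ (65 ≤ o ∧ o < 90) := by
  simp [pyUppercase, PySem.Set.mem_ofList, PySem.List.mem_pyRange_one]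

lemma mem_dig (o : Int) : o ∈ pyDigits ↔ (48 ≤ o ∧ o < 57) := by
  simp [pyDigits, PySem.Set.mem_ofList, PySem.List.mem_pyRange_one]

lemma mem_sym (o : Int) :
    o ∈ pySymbols ↔
      ((32 ≤ o ∧ o < 47) ∨ (58 ≤ o ∧ o < 64) ∨ (91 ≤ o ∧ o < 96) ∨ (123 ≤ o ∧ o < 126)) := by
  simp [pySymbols, PySem.Set.mem_union, PySem.Set.mem_ofList, PySem.List.mem_pyRange_one, or_assoc]

lemma foldA (cs : List Char) : ∀ (v1 v2 v3 v4 v5 g : Int),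
    cs.foldl convStep (v1, v2, v3, v4, v5, g) =
      (v1 + PySem.List.count (cs.map pvLabel) 1,
       v2 + PySem.List.count (cs.map pvLabel) 2,
       v3 + PySem.List.count (cs.map pvLabel) 3,
       v4 + PySem.List.count (cs.map pvLabel) 4,
       v5 + runsFrom g ((cs.map pvLabel).filter (fun l => l != 0)),
       lastFrom g ((cs.map pvLabel).filter (fun l => l != 0))) := by
  induction cs with
  | nil => intro v1 v2 v3 v4 v5 g; simp [runsFrom, lastFrom, PySem.List.count]
  | cons c cs ih =>
    intro v1 v2 v3 v4 v5 g
    simp only [List.foldl_cons, List.map_cons]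
    by_cases h1 : 97 ≤ ((c.toNat : Int)) ∧ (c.toNat : Int) < 122
    · have m1 : (c.toNat : Int) ∈ pyLowercase := (mem_low _).mpr h1
      have m2 : (c.toNat : Int) ∉ pyUppercase := fun h => by have := (mem_up _).mp h; omega
      have m3 : (c.toNat : Int) ∉ pyDigits := fun h => by have := (mem_dig _).mp h; omega
      have m4 : (c.toNat : Int) ∉ pySymbols := fun h => by have := (mem_sym _).mp h; omega
      simp [convStep, pvLabel, m1, m2, m3, m4, ih, PySem.List.count_eq,
        runsFrom, lastFrom]
      by_cases hg : g = 1
      · simp [hg]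
        ring
      · have hg' : ¬((1 : Int) = g) := fun h => hg h.symm
        simp [hg, hg']
        and_intros <;> ring
    by_cases h2 : 65 ≤ ((c.toNat : Int)) ∧ (c.toNat : Int) < 90
    · have m1 : (c.toNat : Int) ∉ pyLowercase := fun h => by have := (mem_low _).mp h; omega
      have m2 : (c.toNat : Int) ∈ pyUppercase := (mem_up _).mpr h2
      have m3 : (c.toNat : Int) ∉ pyDigits := fun h => by have := (mem_dig _).mp h; omega
      have m4 : (c.toNat : Int) ∉ pySymbols := fun h => by have := (mem_sym _).mp h; omega
      simp [convStep, pvLabel, m1, m2, m3, m4, ih, PySem.List.count_eq,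
        runsFrom, lastFrom]
      by_cases hg : g = 2
      · simp [hg]
        ring
      · have hg' : ¬((2 : Int) = g) := fun h => hg h.symm
        simp [hg, hg']
        and_intros <;> ring
    by_cases h3 : 48 ≤ ((c.toNat : Int)) ∧ (c.toNat : Int) < 57
    · have m1 : (c.toNat : Int) ∉ pyLowercase := fun h => by have := (mem_low _).mp h; omega
      have m2 : (c.toNat : Int) ∉ pyUppercase := fun h => by have := (mem_up _).mp h; omega
      have m3 : (c.toNat : Int) ∈ pyDigits := (mem_dig _).mpr h3
      have m4 : (c.toNat : Int) ∉ pySymbols := fun h => by have := (mem_sym _).mp h; omega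
      simp [convStep, pvLabel, m1, m2, m3, m4, ih, PySem.List.count_eq,
        runsFrom, lastFrom]
      by_cases hg : g = 3
      · simp [hg]
        ring
      · have hg' : ¬((3 : Int) = g) := fun h => hg h.symm
        simp [hg, hg']
        and_intros <;> ring
    by_cases h4 : (32 ≤ ((c.toNat : Int)) ∧ (c.toNat : Int) < 47) ∨ (58 ≤ ((c.toNat : Int)) ∧ (c.toNat : Int) < 64) ∨ (91 ≤ ((c.toNat : Int)) ∧ (c.toNat : Int) < 96) ∨ (123 ≤ ((c.toNat : Int)) ∧ (c.toNat : Int) < 126)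
    · have m1 : (c.toNat : Int) ∉ pyLowercase := fun h => by have := (mem_low _).mp h; omega
      have m2 : (c.toNat : Int) ∉ pyUppercase := fun h => by have := (mem_up _).mp h; omega
      have m3 : (c.toNat : Int) ∉ pyDigits := fun h => by have := (mem_dig _).mp h; omega
      have m4 : (c.toNat : Int) ∈ pySymbols := (mem_sym _).mpr h4
      simp [convStep, pvLabel, m1, m2, m3, m4, ih, PySem.List.count_eq,
        runsFrom, lastFrom]
      by_cases hg : g = 4
      · simp [hg]
        ring
      · have hg' : ¬((4 : Int) = g) := fun h => hg h.symm
        simp [hg, hg']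
        and_intros <;> ring
    · have m1 : (c.toNat : Int) ∉ pyLowercase := fun h => by have := (mem_low _).mp h; omega
      have m2 : (c.toNat : Int) ∉ pyUppercase := fun h => by have := (mem_up _).mp h; omega
      have m3 : (c.toNat : Int) ∉ pyDigits := fun h => by have := (mem_dig _).mp h; omega
      have m4 : (c.toNat : Int) ∉ pySymbols := fun h => h4 ((mem_sym _).mp h)
      simp [convStep, pvLabel, m1, m2, m3, m4, ih, PySem.List.count_eq]

lemma foldB (ls : List Int) : ∀ (r p : Int),
    ls.foldl (fun (rp : Int × Int) l => ((if l != rp.2 then rp.1 + 1 else rp.1), l)) (r, p)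
      = (r + runsFrom p ls, lastFrom p ls) := by
  induction ls with
  | nil => intro r p; simp [runsFrom, lastFrom]
  | cons l ls ih =>
    intro r p
    simp only [List.foldl_cons, runsFrom, lastFrom, ih]
    by_cases h : l = p
    · simp [h]
    · simp [h]
      ring_nf

-- ===== VERDICT (by name: the statement is the Claim_ definition above) =====
theorem convert_password_spec : Claim_equal_convert_password := by
  intro password _
  unfold Spec_convert_password convert_password convert_password_alt
  simp only [foldA, foldB]
  simp
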